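-- pv_equiv track=rewrite | github.com/subhande/dsa | arrays/number_of_zero_filled_subarrays.py | zeroFilledSubarray3
-- ===== SOURCE A (Python) =====
-- from typing import List
--
-- def zeroFilledSubarray3(nums: List[int]) -> int:
--         currZeroSubArrLength = 0
--         totalNumberOfZeroSubarrays = 0
--         for num in nums:
--             if num == 0:
--                 currZeroSubArrLength += 1
--             else:
--                 currZeroSubArrLength = 0
--             totalNumberOfZeroSubarrays += currZeroSubArrLength
--         return totalNumberOfZeroSubarrays
-- ===== SOURCE B (Python) =====
-- from typing import List
--
-- def zeroFilledSubarray3(nums: List[int]) -> int: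
--     total = 0
--     i = 0
--     n = len(nums)
--     while i < n:
--         if nums[i] == 0:
--             j = i
--             while j < n and nums[j] == 0:
--                 j += 1
--             L = j - i
--             total += L * (L + 1) // 2
--             i = j
--         else:
--             i += 1
--     return total
-- ===== Notes on version B (the rewrite author's own statement) =====
-- stated objective: alternative
-- what changed: B finds each maximal run of zeros and adds its triangular number L*(L+1)//2 in closed form, instead of A's per-element running-length accumulation.
import Mathlib
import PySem

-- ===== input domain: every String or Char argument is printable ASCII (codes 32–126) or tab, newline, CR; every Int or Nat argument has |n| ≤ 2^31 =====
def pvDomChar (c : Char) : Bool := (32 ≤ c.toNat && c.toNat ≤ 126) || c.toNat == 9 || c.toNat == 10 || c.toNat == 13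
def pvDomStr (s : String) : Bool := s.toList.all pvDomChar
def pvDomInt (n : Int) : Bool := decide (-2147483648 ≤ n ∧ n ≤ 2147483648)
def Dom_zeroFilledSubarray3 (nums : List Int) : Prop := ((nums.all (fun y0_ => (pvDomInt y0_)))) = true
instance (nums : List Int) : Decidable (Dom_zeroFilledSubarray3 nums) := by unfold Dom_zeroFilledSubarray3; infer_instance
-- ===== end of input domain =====

-- B is a run-length alternative: it sums L*(L+1)//2 over maximal zero runs instead of A's per-element running-length accumulation.

-- ===== PORT A =====
-- the for-loop over nums with state (currZeroSubArrLength, total)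
def pvGoA (curr : Int) (total : Int) : List Int → Int
  | [] => total
  | num :: rest =>
      if num = 0 then pvGoA (curr + 1) (total + (curr + 1)) rest
      else pvGoA 0 total rest

def zeroFilledSubarray3 (nums : List Int) : Int := pvGoA 0 0 nums

-- ===== PORT B =====
-- the outer while loop: at a zero, the inner while (takeWhile/dropWhile) finds the run's end j,
-- adds L*(L+1)//2 and jumps to j; at a nonzero it steps one element.
def pvGoB : List Int → Int
  | [] => 0
  | x :: rest =>
      if x = 0 then
        let L : Int := ((1 : Nat) + (rest.takeWhile (fun y => y = 0)).length : Nat)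
        PySem.Int.floordiv (L * (L + 1)) 2 + pvGoB (rest.dropWhile (fun y => y = 0))
      else pvGoB rest
termination_by xs => xs.length
decreasing_by
  · simpa using Nat.lt_succ_of_le (List.length_dropWhile_le _ rest)
  · simp

def zeroFilledSubarray3_alt (nums : List Int) : Int := pvGoB nums

-- ===== PRECONDITION & SPEC =====
def Spec_zeroFilledSubarray3 (nums : List Int) (out : Int) : Prop := out = zeroFilledSubarray3_alt nums
instance (nums : List Int) (out : Int) : Decidable (Spec_zeroFilledSubarray3 nums out) := by unfold Spec_zeroFilledSubarray3; infer_instance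

-- ===== CLAIM (what is proved, stated in full; the proofs are below) =====
def Claim_equal_zeroFilledSubarray3 : Prop := ∀ (nums : List Int), Dom_zeroFilledSubarray3 nums → Spec_zeroFilledSubarray3 nums (zeroFilledSubarray3 nums)

-- ===== LEMMAS AND PROOFS =====

-- the triangular number of the leading-zero run, as B computes it
def pvTri (n : Nat) : Int := PySem.Int.floordiv ((n : Int) * ((n : Int) + 1)) 2

lemma pvTri_succ (n : Nat) : pvTri (n + 1) = pvTri n + (n + 1) := by
  unfold pvTri
  rw [PySem.Int.floordiv_eq_ediv_of_pos (by omega),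
      PySem.Int.floordiv_eq_ediv_of_pos (by omega)]
  obtain ⟨k, hk⟩ := Int.even_mul_succ_self (n : Int)
  push_cast
  have e : ((n:Int) + 1) * ((n:Int) + 1 + 1) = (n:Int) * ((n:Int) + 1) + 2 * ((n:Int) + 1) := by
    ring
  rw [e, hk]
  omega

-- B peels exactly the leading-zero run off any list
lemma pvGoB_peel (xs : List Int) :
    pvGoB xs = pvTri (xs.takeWhile (fun y => y = 0)).length
              + pvGoB (xs.dropWhile (fun y => y = 0)) := by
  cases xs with
  | nil => simp [pvGoB, pvTri, PySem.Int.floordiv]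
  | cons x rest =>
    by_cases hx : x = 0
    · rw [pvGoB]
      simp only [hx, List.takeWhile_cons, List.dropWhile_cons, decide_true, if_true]
      simp [pvTri, Nat.add_comm]
    · have h0 : pvTri 0 = 0 := by decide
      simp [hx, h0]

-- A's loop state vs B: the pending run of length `curr` contributes curr per remaining leading zero
lemma pvGoA_eq (xs : List Int) : ∀ (curr total : Int),
    pvGoA curr total xs
      = total + curr * (xs.takeWhile (fun y => y = 0)).length + pvGoB xs := by
  induction xs with
  | nil => intro curr total; simp [pvGoA, pvGoB]
  | cons x rest ih =>
    intro curr total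
    by_cases hx : x = 0
    · rw [pvGoA]
      simp only [hx, if_true, ih]
      rw [pvGoB_peel rest]
      have hpeel : pvGoB (0 :: rest)
          = pvTri ((rest.takeWhile (fun y => y = 0)).length + 1)
            + pvGoB (rest.dropWhile (fun y => y = 0)) := by
        rw [pvGoB]
        simp [pvTri, Nat.add_comm]
      rw [hpeel, pvTri_succ]
      simp only [List.takeWhile_cons, decide_true, if_true, List.length_cons]
      push_cast
      ring
    · rw [pvGoA]
      simp only [hx, if_false, ih]
      have hB : pvGoB (x :: rest) = pvGoB rest := by rw [pvGoB]; simp [hx]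
      simp [hB, hx]

-- ===== VERDICT (by name: the statement is the Claim_ definition above) =====
theorem zeroFilledSubarray3_spec : Claim_equal_zeroFilledSubarray3 := by
  intro nums _
  unfold Spec_zeroFilledSubarray3 zeroFilledSubarray3 zeroFilledSubarray3_alt
  rw [pvGoA_eq]
  simp
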